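-- pv_equiv track=rewrite | github.com/Dengdengmx/ZTools-main | bio-engine/plugins/plugin_sequence.py | get_index_mapping
-- ===== SOURCE A (Python) =====
-- def get_index_mapping(seq):
--     """提取序列在排除 Gap 后的真实生物学氨基酸/核酸位置索引"""
--     mapping = []
--     idx = 1
--     for char in seq:
--         if char != '-':
--             mapping.append(idx)
--             idx += 1
--         else:
--             mapping.append(None)
--     return mapping
-- ===== SOURCE B (Python) =====
-- def get_index_mapping(seq):
--     """提取序列在排除 Gap 后的真实生物学氨基酸/核酸位置索引"""
--     mapping = [None] * len(seq)
--     positions = [i for i, c in enumerate(seq) if c != '-']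
--     for bio, pos in enumerate(positions, start=1):
--         mapping[pos] = bio
--     return mapping
-- ===== Notes on version B (the rewrite author's own statement) =====
-- stated objective: alternative
-- what changed: Replaces A's append-as-you-go loop with a running counter by a scatter strategy: preallocate an all-None list of len(seq), collect the non-gap positions, and write 1..k into those positions by enumerate; no per-character counter state is kept.
import Mathlib
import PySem

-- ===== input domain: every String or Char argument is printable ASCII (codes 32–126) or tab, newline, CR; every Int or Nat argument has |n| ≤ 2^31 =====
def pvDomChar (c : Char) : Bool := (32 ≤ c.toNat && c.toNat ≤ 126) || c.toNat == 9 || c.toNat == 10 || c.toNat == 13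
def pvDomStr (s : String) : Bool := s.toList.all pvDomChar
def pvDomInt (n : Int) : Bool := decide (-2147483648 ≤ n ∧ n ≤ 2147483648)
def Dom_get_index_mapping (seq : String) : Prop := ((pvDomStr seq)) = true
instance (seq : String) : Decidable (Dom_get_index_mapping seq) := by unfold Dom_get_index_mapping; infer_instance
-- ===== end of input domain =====

-- B replaces A's counter loop by preallocate-then-scatter into non-gap positions; alternative (same cost).


-- ===== PORT A =====
-- A's loop: mapping/idx accumulators, append per character.
def pvALoop : List Char → List (Option Int) → Int → List (Option Int)
  | [], mapping, _ => mapping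
  | c :: cs, mapping, idx =>
      if c ≠ '-' then pvALoop cs (mapping ++ [some idx]) (idx + 1)
      else pvALoop cs (mapping ++ [none]) idx

def get_index_mapping (seq : String) : List (Option Int) :=
  pvALoop seq.toList [] 1

-- ===== PORT B =====
-- Source B: mapping = [None]*len(seq); positions = [i for i,c in enumerate(seq) if c != '-'];
-- for bio,pos in enumerate(positions, 1): mapping[pos] = bio.
-- mapping[pos] = bio is ported with pySetD: exact here, since every pos comes from enumerate(seq)
-- and is therefore a valid (nonnegative, in-range) index, so Python never raises.
def get_index_mapping_alt (seq : String) : List (Option Int) :=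
  let cs := seq.toList
  let mapping := List.replicate cs.length (none : Option Int)
  let positions := (PySem.List.enumerate cs 0).filterMap (fun p => if p.2 ≠ '-' then some p.1 else none)
  (PySem.List.enumerate positions 1).foldl (fun m q => PySem.List.pySetD m q.2 (some q.1)) mapping

-- ===== PRECONDITION & SPEC =====
def Spec_get_index_mapping (seq : String) (out : List (Option Int)) : Prop := out = get_index_mapping_alt seq
instance (seq : String) (out : List (Option Int)) : Decidable (Spec_get_index_mapping seq out) := by unfold Spec_get_index_mapping; infer_instance

-- ===== CLAIM (what is proved, stated in full; the proofs are below) =====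
def Claim_equal_get_index_mapping : Prop := ∀ (seq : String), Dom_get_index_mapping seq → Spec_get_index_mapping seq (get_index_mapping seq)

-- ===== LEMMAS AND PROOFS =====

-- the common middle ground: the per-character map with a running bio index, cons-style
def pvAmap : List Char → Int → List (Option Int)
  | [], _ => []
  | c :: cs, k => if c ≠ '-' then some k :: pvAmap cs (k + 1) else none :: pvAmap cs k

theorem pvALoop_eq (cs : List Char) :
    ∀ (acc : List (Option Int)) (k : Int), pvALoop cs acc k = acc ++ pvAmap cs k := by
  induction cs with
  | nil => intro acc k; simp [pvALoop, pvAmap]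
  | cons c cs ih =>
    intro acc k
    by_cases h : c = '-' <;> simp [pvALoop, pvAmap, h, ih]

-- the non-gap positions of cs, offset by j (what B's comprehension computes)
def pvPosFrom : Int → List Char → List Int
  | _, [] => []
  | j, c :: cs => if c ≠ '-' then j :: pvPosFrom (j + 1) cs else pvPosFrom (j + 1) cs

theorem positions_eq (cs : List Char) :
    ∀ (j : Int),
      (PySem.List.enumerate cs j).filterMap (fun p => if p.2 ≠ '-' then some p.1 else none)
        = pvPosFrom j cs := by
  induction cs with
  | nil => intro j; simp [PySem.List.enumerate_nil, pvPosFrom]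
  | cons c cs ih =>
    intro j
    by_cases h : c = '-' <;> simp [PySem.List.enumerate_cons, pvPosFrom, h] <;>
      simpa using ih (j + 1)

-- B's scatter loop, cons-style
def pvScatter : List Int → Int → List (Option Int) → List (Option Int)
  | [], _, m => m
  | p :: ps, k, m => pvScatter ps (k + 1) (PySem.List.pySetD m p (some k))

theorem foldl_enumerate_eq_scatter (ps : List Int) :
    ∀ (k : Int) (m : List (Option Int)),
      (PySem.List.enumerate ps k).foldl (fun m q => PySem.List.pySetD m q.2 (some q.1)) m
        = pvScatter ps k m := by
  induction ps with
  | nil => intro k m; simp [PySem.List.enumerate_nil, pvScatter]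
  | cons p ps ih => intro k m; simp [PySem.List.enumerate_cons, pvScatter, ih]

theorem set_append_len {α : Type} (pre : List α) (x v : α) (rest : List α) :
    (pre ++ x :: rest).set pre.length v = pre ++ v :: rest := by
  induction pre with
  | nil => simp
  | cons a pre ih => simp [ih]

theorem scatter_eq (cs : List Char) :
    ∀ (pre : List (Option Int)) (k : Int),
      pvScatter (pvPosFrom (pre.length : Int) cs) k (pre ++ List.replicate cs.length none)
        = pre ++ pvAmap cs k := by
  induction cs with
  | nil => intro pre k; simp [pvPosFrom, pvScatter, pvAmap]
  | cons c cs ih =>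
    intro pre k
    by_cases h : c = '-'
    · have := ih (pre ++ [none]) k
      simp only [List.length_append, List.length_cons] at this ⊢
      simpa [pvPosFrom, pvAmap, h, List.replicate_succ] using this
    · have hset : PySem.List.pySetD
          (pre ++ (none : Option Int) :: List.replicate cs.length none)
          ((pre.length : Int)) (some k)
          = pre ++ some k :: List.replicate cs.length none := by
        rw [PySem.List.pySetD_natCast, set_append_len]
      have := ih (pre ++ [some k]) (k + 1)
      simp only [pvPosFrom, h, ne_eq, not_false_eq_true, if_pos, List.replicate_succ,
        pvScatter, pvAmap, List.length_cons]
      rw [hset]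
      simpa using this

-- ===== VERDICT (by name: the statement is the Claim_ definition above) =====
theorem get_index_mapping_spec : Claim_equal_get_index_mapping := by
  intro seq _
  show _ = _
  rw [get_index_mapping, get_index_mapping_alt]
  rw [pvALoop_eq, positions_eq, foldl_enumerate_eq_scatter]
  have := scatter_eq seq.toList [] 1
  simpa using this.symm
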